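-- pv_equiv track=rewrite | github.com/CShaoxiang/CS-Learn | UCSD  Data Structure an Algorithms Specialisation/Algorithmic ToolBox/Week2/Programming Assignment 2 Warm Up/fibonacci_huge.py | fibonacci_huge_naive
-- ===== SOURCE A (Python) =====
-- def fibonacci_huge_naive(n, m):
--     if n <= 1:
--         return n
--
--     n = n + 1
--
--     memo = [0] * n
--     memo[1] = 1
--
--     for index in range(2, n):
--         memo[index] = (memo[index - 1] + memo[index - 2])
--
--     return gcd(memo[n - 1], m)
--
-- def gcd(a, b):
--     if b == 0:
--         return a
--     if a == 0:
--         return b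
--
--     if a == b:
--         return a
--
--     if a > b:
--         return gcd(b, a % b)
--
--     return gcd(a, b % a)
-- ===== SOURCE B (Python) =====
-- def fibonacci_huge_naive(n, m):
--     if n <= 1:
--         return n
--
--     def red(x):
--         return x % m if m else x
--
--     def fib_pair(k):
--         # (Fib(k), Fib(k+1)) reduced by red, via fast doubling
--         if k == 0:
--             return (0, red(1))
--         a, b = fib_pair(k >> 1)
--         c = red(a * (2 * b - a))
--         d = red(a * a + b * b)
--         if k & 1:
--             return (d, red(c + d))
--         return (c, d)
--
--     a = fib_pair(n)[0]
--     b = m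
--     while b:
--         a, b = b, a % b
--     return a
-- ===== Notes on version B (the rewrite author's own statement) =====
-- stated objective: faster
-- what changed: A builds the full big-integer Fibonacci table memo[0..n] and applies a recursive gcd; B computes Fib(n) reduced mod m by fast doubling (O(log n) modular operations; exact only when m == 0) and takes the gcd with an iterative Euclid loop, which is valid since gcd(Fib(n), m) = gcd(Fib(n) mod m, m).
-- outside the precondition, e.g. on fibonacci_huge_naive(3, -2): A returns -2, B returns -2; on fibonacci_huge_naive(5, -2): A raises RecursionError, B returns -1
import Mathlib
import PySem

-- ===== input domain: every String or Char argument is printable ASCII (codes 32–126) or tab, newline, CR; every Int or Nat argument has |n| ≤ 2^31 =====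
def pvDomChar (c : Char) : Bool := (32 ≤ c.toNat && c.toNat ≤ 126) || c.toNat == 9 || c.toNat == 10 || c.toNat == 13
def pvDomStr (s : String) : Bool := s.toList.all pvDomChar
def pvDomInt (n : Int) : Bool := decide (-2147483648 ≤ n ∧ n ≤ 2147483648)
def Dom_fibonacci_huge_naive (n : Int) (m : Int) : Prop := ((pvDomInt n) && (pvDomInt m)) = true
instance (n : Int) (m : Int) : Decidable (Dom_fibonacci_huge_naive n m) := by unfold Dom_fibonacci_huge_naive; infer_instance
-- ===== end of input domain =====

-- B replaces A's O(n) big-integer Fibonacci table by fast-doubling of Fib(n) mod m (gcd-preserving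
-- reduction) followed by an iterative Euclid loop; objective: faster (asymptotically fewer/smaller
-- big-integer operations).

-- ===== PORT A =====

-- A's recursive gcd; the Nat argument is a FUEL totality guard only (A's recursion is not
-- structurally decreasing on Int); the caller passes fuel that provably suffices on Pre_.
def pvGcdA : Nat → Int → Int → Int
  | 0, a, _ => a
  | fuel + 1, a, b =>
    if b = 0 then a
    else if a = 0 then b
    else if a = b then a
    else if a > b then pvGcdA fuel b (PySem.Int.mod a b)
    else pvGcdA fuel a (PySem.Int.mod b a)

-- loop body: memo[index] = memo[index-1] + memo[index-2]
def pvStepA (memo : List Int) (index : Int) : List Int :=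
  PySem.List.pySetD memo index
    (PySem.List.pyGetD memo (index - 1) 0 + PySem.List.pyGetD memo (index - 2) 0)

def fibonacci_huge_naive (n : Int) (m : Int) : Int :=
  if n ≤ 1 then n
  else
    let n1 := n + 1
    let memo0 := PySem.List.pySetD (List.replicate n1.toNat (0 : Int)) 1 1
    let memo := (PySem.List.pyRange 2 n1).foldl pvStepA memo0
    let a := PySem.List.pyGetD memo (n1 - 1) 0
    pvGcdA (a.natAbs + m.natAbs + 1) a m

-- ===== PORT B =====

-- red(x) = x % m if m else x
def pvRed (m : Int) (x : Int) : Int := if m = 0 then x else PySem.Int.mod x m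

lemma pvMod_natAbs_lt (a b : Int) (h : b ≠ 0) : (PySem.Int.mod a b).natAbs < b.natAbs := by
  rcases lt_trichotomy b 0 with hb | hb | hb
  · have h1 := PySem.Int.mod_neg_bounds a hb
    omega
  · exact absurd hb h
  · have h1 := PySem.Int.mod_nonneg a hb
    have h2 := PySem.Int.mod_lt a hb
    omega

-- fast-doubling pair (red(Fib(k)), red(Fib(k+1)))
def pvFibPair (m : Int) (k : Nat) : Int × Int :=
  if h : k = 0 then (0, pvRed m 1)
  else
    let p := pvFibPair m (k / 2)
    let a := p.1
    let b := p.2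
    let c := pvRed m (a * (2 * b - a))
    let d := pvRed m (a * a + b * b)
    if k % 2 = 1 then (d, pvRed m (c + d)) else (c, d)
  termination_by k
  decreasing_by exact Nat.div_lt_self (Nat.pos_of_ne_zero h) (by omega)

-- while b: a, b = b, a % b
def pvGcdB (a : Int) (b : Int) : Int :=
  if h : b = 0 then a else pvGcdB b (PySem.Int.mod a b)
  termination_by b.natAbs
  decreasing_by exact pvMod_natAbs_lt a b h

def fibonacci_huge_naive_alt (n : Int) (m : Int) : Int :=
  if n ≤ 1 then n
  else pvGcdB (pvFibPair m n.toNat).1 m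

-- ===== PRECONDITION & SPEC =====
-- Pre_ excludes m < 0 (with n ≥ 2): there A's recursive gcd recurses without progress and hits
-- Python's recursion limit (RecursionError), except in the accidental case m | Fib(n), where A
-- returns the negative m.
def Pre_fibonacci_huge_naive (n : Int) (m : Int) : Prop := n ≤ 1 ∨ 0 ≤ m
instance (n : Int) (m : Int) : Decidable (Pre_fibonacci_huge_naive n m) := by unfold Pre_fibonacci_huge_naive; infer_instance
def pvWitness_fibonacci_huge_naive : Int × Int := (10, 7)

def Spec_fibonacci_huge_naive (n : Int) (m : Int) (out : Int) : Prop := out = fibonacci_huge_naive_alt n m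
instance (n : Int) (m : Int) (out : Int) : Decidable (Spec_fibonacci_huge_naive n m out) := by unfold Spec_fibonacci_huge_naive; infer_instance

-- ===== CLAIM (what is proved, stated in full; the proofs are below) =====
def Claim_equal_fibonacci_huge_naive : Prop := ∀ (n : Int) (m : Int), Dom_fibonacci_huge_naive n m → Pre_fibonacci_huge_naive n m → Spec_fibonacci_huge_naive n m (fibonacci_huge_naive n m)

-- ===== LEMMAS AND PROOFS =====

-- the Fibonacci table A's loop builds: after processing range(2, j) the first j entries are Fib
def pvTab (N j : Nat) : List Int :=
  (List.range N).map (fun i => if i < j ∨ i = 1 then (Nat.fib i : Int) else 0)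

lemma pvTab_init (N : Nat) (hN : 2 ≤ N) :
    PySem.List.pySetD (List.replicate N (0 : Int)) 1 1 = pvTab N 2 := by
  rw [show (1 : Int) = ((1 : Nat) : Int) from rfl, PySem.List.pySetD_natCast]
  apply List.ext_getElem
  · simp [pvTab]
  · intro i h1 h2
    simp only [pvTab, List.getElem_set, List.getElem_replicate, List.getElem_map,
      List.getElem_range]
    match i with
    | 0 => simp
    | 1 => simp
    | (i+2) => simp

lemma pvTab_step (N t : Nat) (h : t + 2 < N) :
    pvStepA (pvTab N (t + 2)) ((t : Int) + 2) = pvTab N (t + 3) := by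
  unfold pvStepA
  have e1 : ((t : Int) + 2 - 1) = ((t + 1 : Nat) : Int) := by push_cast; ring
  have e2 : ((t : Int) + 2 - 2) = ((t : Nat) : Int) := by push_cast; ring
  have e3 : ((t : Int) + 2) = ((t + 2 : Nat) : Int) := by push_cast; ring
  rw [e1, e2, e3, PySem.List.pyGetD_natCast, PySem.List.pyGetD_natCast,
    PySem.List.pySetD_natCast]
  have g1 : (pvTab N (t + 2)).getD (t + 1) 0 = (Nat.fib (t + 1) : Int) := by
    simp [pvTab, List.getD, show t + 1 < N by omega]
  have g2 : (pvTab N (t + 2)).getD t 0 = (Nat.fib t : Int) := by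
    simp [pvTab, List.getD, show t < N by omega]
  rw [g1, g2]
  apply List.ext_getElem
  · simp [pvTab]
  · intro i h1 h2
    simp only [pvTab, List.length_map, List.length_range] at h1 h2 ⊢
    simp only [List.getElem_set, List.getElem_map, List.getElem_range]
    by_cases hi : t + 2 = i
    · subst hi
      rw [if_pos rfl, if_pos (Or.inl (by omega))]
      rw [Nat.fib_add_two]
      push_cast
      ring
    · rw [if_neg hi]
      have : (i < t + 2 ∨ i = 1) ↔ (i < t + 3 ∨ i = 1) := by omega
      simp only [this]

lemma pvTab_loop (N t : Nat) (h : t + 2 ≤ N) :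
    (PySem.List.pyRange 2 ((t : Int) + 2)).foldl pvStepA (pvTab N 2) = pvTab N (t + 2) := by
  induction t with
  | zero =>
    norm_num
  | succ t ih =>
    have hc : ((t + 1 : Nat) : Int) + 2 = ((t : Int) + 2) + 1 := by push_cast; ring
    rw [hc, PySem.List.pyRange_one_succ_right (by omega), List.foldl_append]
    simp only [List.foldl]
    rw [ih (by omega), pvTab_step N t (by omega)]

lemma pvMemo_final (n : Int) (hn : 2 ≤ n) :
    PySem.List.pyGetD
      ((PySem.List.pyRange 2 (n + 1)).foldl pvStepA
        (PySem.List.pySetD (List.replicate (n + 1).toNat (0 : Int)) 1 1)) (n + 1 - 1) 0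
      = (Nat.fib n.toNat : Int) := by
  have hpos : 0 ≤ n + 1 := by omega
  have hNdef := Int.toNat_of_nonneg hpos
  set N := (n + 1).toNat
  have hN2 : 2 ≤ N := by omega
  set t := N - 2 with ht
  have htN : t + 2 = N := by omega
  have hc : (n + 1 : Int) = (t : Int) + 2 := by push_cast; omega
  rw [pvTab_init N hN2, hc, pvTab_loop N t (by omega), htN]
  have hidx : ((t : Int) + 2 - 1) = ((n.toNat : Nat) : Int) := by push_cast; omega
  rw [hidx, PySem.List.pyGetD_natCast]
  simp [pvTab, List.getD, show n.toNat < N by omega]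

lemma pvGcdA_eq (fuel : Nat) (a b : Int) (ha : 0 < a) (hb : 0 ≤ b)
    (hf : a.natAbs + b.natAbs < fuel) : pvGcdA fuel a b = ((Int.gcd a b : Nat) : Int) := by
  induction fuel generalizing a b with
  | zero => omega
  | succ f ih =>
    simp only [pvGcdA]
    split_ifs with h1 h2 h3 h4
    · subst h1
      simp [Int.natAbs_of_nonneg ha.le]
    · omega
    · subst h3
      simp [Int.gcd_self, Int.natAbs_of_nonneg ha.le]
    · have hb' : 0 < b := by omega
      rw [PySem.Int.mod_eq_emod_of_pos hb']
      have hmn := Int.emod_nonneg a (show b ≠ 0 by omega)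
      have hml := Int.emod_lt_of_pos a hb'
      rw [ih b (a % b) hb' hmn (by omega)]
      congr 1
      rw [Int.gcd_comm]
      exact Int.gcd_emod a b
    · have hab : a < b := by omega
      rw [PySem.Int.mod_eq_emod_of_pos ha]
      have hmn := Int.emod_nonneg b (show a ≠ 0 by omega)
      have hml := Int.emod_lt_of_pos b ha
      rw [ih a (b % a) ha hmn (by omega)]
      congr 1
      rw [Int.gcd_comm a, Int.gcd_emod b a, Int.gcd_comm b a]

lemma pvGcdB_eq (k : Nat) (a b : Int) (hk : b.natAbs ≤ k) (ha : 0 ≤ a) (hb : 0 ≤ b) :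
    pvGcdB a b = ((Int.gcd a b : Nat) : Int) := by
  induction k generalizing a b with
  | zero =>
    have hb0 : b = 0 := by omega
    rw [pvGcdB, dif_pos hb0, hb0]
    simp [Int.natAbs_of_nonneg ha]
  | succ k ih =>
    rw [pvGcdB]
    split_ifs with h
    · subst h
      simp [Int.natAbs_of_nonneg ha]
    · have hb' : 0 < b := by omega
      rw [PySem.Int.mod_eq_emod_of_pos hb']
      have hmn := Int.emod_nonneg a (show b ≠ 0 by omega)
      have hml := Int.emod_lt_of_pos a hb'
      rw [ih b (a % b) (by omega) hb hmn]
      congr 1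
      rw [Int.gcd_comm]
      exact Int.gcd_emod a b

lemma pvFib_dbl (j : Nat) :
    (Nat.fib (2 * j) : Int) = (Nat.fib j : Int) * (2 * (Nat.fib (j + 1) : Int) - (Nat.fib j : Int)) := by
  have hle : Nat.fib j ≤ 2 * Nat.fib (j + 1) := by
    have := Nat.fib_le_fib_succ (n := j); omega
  have h := Nat.fib_two_mul j
  calc (Nat.fib (2 * j) : Int) = ((Nat.fib j * (2 * Nat.fib (j + 1) - Nat.fib j) : Nat) : Int) := by
        rw [h]
    _ = _ := by push_cast [hle]; ring

lemma pvFib_dbl1 (j : Nat) :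
    (Nat.fib (2 * j + 1) : Int)
      = (Nat.fib j : Int) * (Nat.fib j : Int) + (Nat.fib (j + 1) : Int) * (Nat.fib (j + 1) : Int) := by
  have h := Nat.fib_two_mul_add_one j
  calc (Nat.fib (2 * j + 1) : Int) = ((Nat.fib (j + 1) ^ 2 + Nat.fib j ^ 2 : Nat) : Int) := by rw [h]
    _ = _ := by push_cast; ring

lemma pvFibPair_zero (k : Nat) :
    pvFibPair 0 k = ((Nat.fib k : Int), (Nat.fib (k + 1) : Int)) := by
  induction k using Nat.strong_induction_on with
  | _ k ih =>
    rw [pvFibPair]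
    by_cases hk : k = 0
    · simp [hk, pvRed]
    · rw [dif_neg hk]
      rw [ih (k / 2) (Nat.div_lt_self (by omega) (by omega))]
      simp only [pvRed, if_pos]
      set j := k / 2 with hj
      by_cases hp : k % 2 = 1
      · have hk2 : k = 2 * j + 1 := by omega
        rw [if_pos hp]
        refine Prod.ext ?_ ?_
        · show (Nat.fib j : Int) * (Nat.fib j : Int) + (Nat.fib (j+1) : Int) * (Nat.fib (j+1) : Int)
            = (Nat.fib k : Int)
          rw [hk2, pvFib_dbl1]
        · show (Nat.fib j : Int) * (2 * (Nat.fib (j+1) : Int) - (Nat.fib j : Int))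
            + ((Nat.fib j : Int) * (Nat.fib j : Int) + (Nat.fib (j+1) : Int) * (Nat.fib (j+1) : Int))
            = (Nat.fib (k + 1) : Int)
          rw [show k + 1 = 2 * j + 2 by omega, Nat.fib_add_two]
          push_cast
          rw [pvFib_dbl, pvFib_dbl1]
      · have hk2 : k = 2 * j := by omega
        rw [if_neg hp]
        refine Prod.ext ?_ ?_
        · show (Nat.fib j : Int) * (2 * (Nat.fib (j+1) : Int) - (Nat.fib j : Int)) = (Nat.fib k : Int)
          rw [hk2, pvFib_dbl]
        · show (Nat.fib j : Int) * (Nat.fib j : Int) + (Nat.fib (j+1) : Int) * (Nat.fib (j+1) : Int)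
            = (Nat.fib (k + 1) : Int)
          rw [show k + 1 = 2 * j + 1 by omega, pvFib_dbl1]

lemma pvFibPair_pos (m : Int) (hm : 0 < m) (k : Nat) :
    pvFibPair m k = ((Nat.fib k : Int) % m, (Nat.fib (k + 1) : Int) % m) := by
  have hm0 : m ≠ 0 := by omega
  have hmod : ∀ x : Int, x % m ≡ x [ZMOD m] := fun x => Int.emod_emod_of_dvd x dvd_rfl
  induction k using Nat.strong_induction_on with
  | _ k ih =>
    rw [pvFibPair]
    by_cases hk : k = 0
    · simp [hk, pvRed, hm0, PySem.Int.mod_eq_emod_of_pos hm]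
    · rw [dif_neg hk]
      rw [ih (k / 2) (Nat.div_lt_self (by omega) (by omega))]
      simp only [pvRed, if_neg hm0, PySem.Int.mod_eq_emod_of_pos hm]
      set j := k / 2 with hj
      set A := (Nat.fib j : Int) with hA
      set B := (Nat.fib (j + 1) : Int) with hB
      have hc : (A % m * (2 * (B % m) - A % m)) % m = (Nat.fib (2 * j) : Int) % m := by
        rw [pvFib_dbl j, ← hA, ← hB]
        exact (hmod A).mul ((Int.ModEq.mul_left 2 (hmod B)).sub (hmod A))
      have hd : (A % m * (A % m) + B % m * (B % m)) % m = (Nat.fib (2 * j + 1) : Int) % m := by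
        rw [pvFib_dbl1 j, ← hA, ← hB]
        exact ((hmod A).mul (hmod A)).add ((hmod B).mul (hmod B))
      by_cases hp : k % 2 = 1
      · have hk2 : k = 2 * j + 1 := by omega
        rw [if_pos hp]
        refine Prod.ext ?_ ?_
        · show (A % m * (A % m) + B % m * (B % m)) % m = (Nat.fib k : Int) % m
          rw [hd, hk2]
        · show ((A % m * (2 * (B % m) - A % m)) % m + (A % m * (A % m) + B % m * (B % m)) % m) % m
            = (Nat.fib (k + 1) : Int) % m
          have : (Nat.fib (k + 1) : Int) = (Nat.fib (2 * j) : Int) + (Nat.fib (2 * j + 1) : Int) := by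
            rw [show k + 1 = 2 * j + 2 by omega, Nat.fib_add_two]
            push_cast
            ring
          rw [this, hc, hd]
          exact (hmod _).add (hmod _)
      · have hk2 : k = 2 * j := by omega
        rw [if_neg hp]
        refine Prod.ext ?_ ?_
        · show (A % m * (2 * (B % m) - A % m)) % m = (Nat.fib k : Int) % m
          rw [hc, hk2]
        · show (A % m * (A % m) + B % m * (B % m)) % m = (Nat.fib (k + 1) : Int) % m
          rw [hd, show k + 1 = 2 * j + 1 by omega]

-- ===== VERDICT (by name: the statement is the Claim_ definition above) =====
theorem fibonacci_huge_naive_spec : Claim_equal_fibonacci_huge_naive := by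
  intro n m hdom hpre
  unfold Spec_fibonacci_huge_naive
  by_cases hn : n ≤ 1
  · simp [fibonacci_huge_naive, fibonacci_huge_naive_alt, hn]
  · have hn2 : 2 ≤ n := by omega
    have hm : 0 ≤ m := by
      rcases hpre with h | h
      · omega
      · exact h
    have hF : 0 < Nat.fib n.toNat := by
      rw [Nat.fib_pos]
      omega
    simp only [fibonacci_huge_naive, fibonacci_huge_naive_alt, if_neg hn]
    rw [pvMemo_final n hn2]
    rcases eq_or_lt_of_le hm with hm0 | hmpos
    · obtain rfl : m = 0 := hm0.symm
      rw [pvFibPair_zero]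
      rw [pvGcdB]
      simp [pvGcdA]
    · rw [pvFibPair_pos m hmpos]
      have hFi : (0 : Int) < (Nat.fib n.toNat : Int) := by exact_mod_cast hF
      rw [pvGcdA_eq _ _ _ hFi hm (by omega)]
      rw [pvGcdB_eq m.natAbs _ _ le_rfl (Int.emod_nonneg _ (by omega)) hm]
      congr 1
      exact (Int.gcd_emod _ _).symm
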